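-- pv_equiv track=rewrite | github.com/RyoSpiralArchitect/ZOCR | zocr/orchestrator/zocr_pipeline.py | _needs_rerun_for_keys
-- ===== SOURCE A (Python) =====
-- from typing import Any, Dict, List, Optional, Tuple, Set, TypedDict
--
-- def _needs_rerun_for_keys(keys: List[str]) -> Dict[str, bool]:
--     rerun = {"augment": False, "monitor": False}
--     for key in keys:
--         if key in {"lambda_shape", "header_boost", "reanalyze_target"}:
--             rerun["augment"] = True
--             rerun["monitor"] = True
--         elif key in {"w_kw", "w_img", "ocr_min_conf", "force_monitor_refresh"}:
--             rerun["monitor"] = True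
--     return rerun
-- ===== SOURCE B (Python) =====
-- _STAGE_TRIGGERS = {
--     "augment": ("lambda_shape", "header_boost", "reanalyze_target"),
--     "monitor": ("lambda_shape", "header_boost", "reanalyze_target",
--                 "w_kw", "w_img", "ocr_min_conf", "force_monitor_refresh"),
-- }
--
-- def _needs_rerun_for_keys(keys):
--     return {stage: any(t in keys for t in trigs)
--             for stage, trigs in _STAGE_TRIGGERS.items()}
-- ===== Notes on version B (the rewrite author's own statement) =====
-- stated objective: simpler
-- what changed: Inverts the traversal: instead of A's per-key loop over the input mutating a flag dict, B iterates a static stage-to-triggers table and asks for each trigger whether it occurs among the changed keys, building the result in one comprehension.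
import Mathlib
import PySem

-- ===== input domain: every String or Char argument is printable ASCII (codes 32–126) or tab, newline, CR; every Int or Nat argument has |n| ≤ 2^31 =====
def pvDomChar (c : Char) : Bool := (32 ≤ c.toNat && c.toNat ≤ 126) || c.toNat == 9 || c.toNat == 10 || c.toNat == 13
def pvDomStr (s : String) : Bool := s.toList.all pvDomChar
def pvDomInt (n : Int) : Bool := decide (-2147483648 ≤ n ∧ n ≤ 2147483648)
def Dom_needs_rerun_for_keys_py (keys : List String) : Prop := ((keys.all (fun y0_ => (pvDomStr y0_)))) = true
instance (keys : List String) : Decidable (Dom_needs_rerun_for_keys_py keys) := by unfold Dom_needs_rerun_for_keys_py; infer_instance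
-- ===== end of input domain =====

-- B inverts the traversal: instead of A's per-key loop mutating a flag dict, B maps over a
-- static stage→triggers table and tests each trigger for membership in keys (simpler; same cost).

-- ===== PORT A =====
def needs_rerun_for_keys_py (keys : List String) : List (String × Bool) :=
  let rerun : PySem.Dict String Bool := PySem.Dict.ofList [("augment", false), ("monitor", false)]
  (keys.foldl (fun rerun key =>
    if key ∈ (["lambda_shape", "header_boost", "reanalyze_target"] : List String) then
      (rerun.insert "augment" true).insert "monitor" true
    else if key ∈ (["w_kw", "w_img", "ocr_min_conf", "force_monitor_refresh"] : List String) then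
      rerun.insert "monitor" true
    else rerun) rerun).items

-- ===== PORT B =====
def pvStageTriggers : List (String × List String) :=
  [("augment", ["lambda_shape", "header_boost", "reanalyze_target"]),
   ("monitor", ["lambda_shape", "header_boost", "reanalyze_target",
                "w_kw", "w_img", "ocr_min_conf", "force_monitor_refresh"])]

def needs_rerun_for_keys_py_alt (keys : List String) : List (String × Bool) :=
  pvStageTriggers.map (fun p => (p.1, p.2.any (fun t => keys.contains t)))

-- ===== PRECONDITION & SPEC =====
def Spec_needs_rerun_for_keys_py (keys : List String) (out : List (String × Bool)) : Prop := out = needs_rerun_for_keys_py_alt keys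
instance (keys : List String) (out : List (String × Bool)) : Decidable (Spec_needs_rerun_for_keys_py keys out) := by unfold Spec_needs_rerun_for_keys_py; infer_instance

-- ===== CLAIM (what is proved, stated in full; the proofs are below) =====
def Claim_equal_needs_rerun_for_keys_py : Prop := ∀ (keys : List String), Dom_needs_rerun_for_keys_py keys → Spec_needs_rerun_for_keys_py keys (needs_rerun_for_keys_py keys)

-- ===== LEMMAS AND PROOFS =====

lemma dict0_eq : PySem.Dict.ofList [("augment", false), ("monitor", false)]
    = PySem.Dict.mk [("augment", false), ("monitor", false)] := rfl

lemma ins_augment (a m : Bool) :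
    PySem.Dict.insert (PySem.Dict.mk [("augment", a), ("monitor", m)]) "augment" true
    = PySem.Dict.mk [("augment", true), ("monitor", m)] := rfl

lemma ins_monitor (a m : Bool) :
    PySem.Dict.insert (PySem.Dict.mk [("augment", a), ("monitor", m)]) "monitor" true
    = PySem.Dict.mk [("augment", a), ("monitor", true)] := rfl

-- A's loop over any starting pair of flags: the result flags are 'some key hits the trigger set'.
lemma loopA_eq (keys : List String) (a m : Bool) :
    keys.foldl (fun rerun key =>
      if key ∈ (["lambda_shape", "header_boost", "reanalyze_target"] : List String) then
        (PySem.Dict.insert (PySem.Dict.insert rerun "augment" true) "monitor" true)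
      else if key ∈ (["w_kw", "w_img", "ocr_min_conf", "force_monitor_refresh"] : List String) then
        PySem.Dict.insert rerun "monitor" true
      else rerun) (PySem.Dict.mk [("augment", a), ("monitor", m)])
    = PySem.Dict.mk [("augment", a || keys.any (fun k => decide (k ∈ (["lambda_shape", "header_boost", "reanalyze_target"] : List String)))),
       ("monitor", m || keys.any (fun k => decide (k ∈ (["lambda_shape", "header_boost", "reanalyze_target"] : List String))
                                        || decide (k ∈ (["w_kw", "w_img", "ocr_min_conf", "force_monitor_refresh"] : List String))))] := by
  induction keys generalizing a m with
  | nil => simp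
  | cons k ks ih =>
    rw [List.foldl_cons]
    by_cases h1 : k ∈ (["lambda_shape", "header_boost", "reanalyze_target"] : List String)
    · rw [if_pos h1, ins_augment, ins_monitor, ih]
      simp at h1
      rcases h1 with rfl | rfl | rfl <;> simp
    · rw [if_neg h1]
      by_cases h2 : k ∈ (["w_kw", "w_img", "ocr_min_conf", "force_monitor_refresh"] : List String)
      · rw [if_pos h2, ins_monitor, ih]
        simp at h1 h2
        obtain ⟨e1, e2, e3⟩ := h1
        rcases h2 with rfl | rfl | rfl | rfl <;> simp
      · rw [if_neg h2, ih]
        simp at h1 h2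
        obtain ⟨e1, e2, e3⟩ := h1
        obtain ⟨f1, f2, f3, f4⟩ := h2
        simp [e1, e2, e3, f1, f2, f3, f4]

-- Exists-swap: 'some input key is a trigger' ↔ 'some trigger occurs among the input keys'.
lemma any_mem_swap (keys t : List String) :
    keys.any (fun k => decide (k ∈ t)) = t.any (fun x => keys.contains x) := by
  rw [Bool.eq_iff_iff]
  simp [List.any_eq_true]
  exact ⟨fun ⟨x, hx, h⟩ => ⟨x, h, hx⟩, fun ⟨x, hx, h⟩ => ⟨x, h, hx⟩⟩

-- ===== VERDICT (by name: the statement is the Claim_ definition above) =====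
theorem needs_rerun_for_keys_py_spec : Claim_equal_needs_rerun_for_keys_py := by
  intro keys _
  show needs_rerun_for_keys_py keys = needs_rerun_for_keys_py_alt keys
  simp only [needs_rerun_for_keys_py, needs_rerun_for_keys_py_alt, pvStageTriggers,
    dict0_eq, loopA_eq, Bool.false_or, List.map_cons, List.map_nil]
  have h : (keys.any fun k =>
        decide (k ∈ (["lambda_shape", "header_boost", "reanalyze_target"] : List String))
        || decide (k ∈ (["w_kw", "w_img", "ocr_min_conf", "force_monitor_refresh"] : List String)))
      = (["lambda_shape", "header_boost", "reanalyze_target",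
          "w_kw", "w_img", "ocr_min_conf", "force_monitor_refresh"] : List String).any
          (fun x => keys.contains x) := by
    rw [Bool.eq_iff_iff]
    simp [List.any_eq_true]
    constructor
    · rintro ⟨x, hx, h | h⟩
      · rcases h with rfl | rfl | rfl <;> simp [hx]
      · rcases h with rfl | rfl | rfl | rfl <;> simp [hx]
    · rintro (h | h | h | h | h | h | h) <;> exact ⟨_, h, by simp⟩
  rw [any_mem_swap, h]
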